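-- pv_equiv track=rewrite | github.com/DarkhanAmanzhol/pp2-spring2023-practice | L3 - Solution/task10.py | is_right_triangle
-- ===== SOURCE A (Python) =====
-- def is_right_triangle(edges):
--     if len(edges) != 3:
--         return False
--     for i in range(3):
--         edge1, edge2, edge3 = edges[i], edges[i-1], edges[i-2]
--         if edge1 * edge1 == edge2 * edge2 + edge3 * edge3:
--             return True
--     return False
-- ===== SOURCE B (Python) =====
-- def is_right_triangle(edges):
--     if len(edges) != 3:
--         return False
--     x, y, z = (e * e for e in edges)
--     return 2 * max(x, y, z) == x + y + z
-- ===== Notes on version B (the rewrite author's own statement) =====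
-- stated objective: simpler
-- what changed: Replaces the three cyclic hypotenuse trials with a single test 2*max(squares) == sum(squares), valid because only the largest square can equal the sum of the other two.
import Mathlib
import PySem

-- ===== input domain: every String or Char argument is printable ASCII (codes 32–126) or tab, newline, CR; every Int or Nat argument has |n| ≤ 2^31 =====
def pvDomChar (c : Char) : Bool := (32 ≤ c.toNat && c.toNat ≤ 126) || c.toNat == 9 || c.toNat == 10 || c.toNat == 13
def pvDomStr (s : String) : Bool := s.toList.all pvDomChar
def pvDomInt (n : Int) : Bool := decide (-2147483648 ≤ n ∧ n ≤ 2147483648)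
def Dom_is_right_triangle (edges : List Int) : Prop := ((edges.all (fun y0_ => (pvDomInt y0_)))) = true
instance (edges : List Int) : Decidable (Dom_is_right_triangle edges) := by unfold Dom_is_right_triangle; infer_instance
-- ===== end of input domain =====

-- B replaces A's three cyclic hypotenuse trials by the single test 2*max(squares) = sum(squares); objective: simpler.

-- ===== PORT A =====
-- the for-loop over range(3) with early return; pyGet? handles the negative indices i-1, i-2
def pvALoop (edges : List Int) : List Int → Bool
  | [] => false
  | i :: rest =>
    match PySem.List.pyGet? edges i, PySem.List.pyGet? edges (i - 1), PySem.List.pyGet? edges (i - 2) with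
    | some edge1, some edge2, some edge3 =>
        if edge1 * edge1 == edge2 * edge2 + edge3 * edge3 then true else pvALoop edges rest
    | _, _, _ => false  -- IndexError: unreachable, since len(edges) = 3 and i ∈ {0,1,2}

def is_right_triangle (edges : List Int) : Bool :=
  if edges.length ≠ 3 then false
  else pvALoop edges (PySem.List.pyRange 0 3 1)

-- ===== PORT B =====
def is_right_triangle_alt (edges : List Int) : Bool :=
  match edges with
  | [e1, e2, e3] =>
      let x := e1 * e1
      let y := e2 * e2
      let z := e3 * e3
      2 * max (max x y) z == x + y + z
  | _ => false

-- ===== PRECONDITION & SPEC =====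
def Spec_is_right_triangle (edges : List Int) (out : Bool) : Prop := out = is_right_triangle_alt edges
instance (edges : List Int) (out : Bool) : Decidable (Spec_is_right_triangle edges out) := by unfold Spec_is_right_triangle; infer_instance

-- ===== CLAIM (what is proved, stated in full; the proofs are below) =====
def Claim_equal_is_right_triangle : Prop := ∀ (edges : List Int), Dom_is_right_triangle edges → Spec_is_right_triangle edges (is_right_triangle edges)

-- ===== LEMMAS AND PROOFS =====

-- the whole content on a 3-element list: A's loop equals B's single max-against-sum test
theorem pvALoop_eq_maxTest (a b c : Int) :
    pvALoop [a, b, c] [0, 1, 2] =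
      (2 * max (max (a * a) (b * b)) (c * c) == a * a + b * b + c * c) := by
  norm_num [pvALoop, PySem.List.pyGet?, PySem.List.pyIdx?]
  norm_num [show Int.toNat 2 = 2 from rfl]
  have hx : 0 ≤ a * a := mul_self_nonneg a
  have hy : 0 ≤ b * b := mul_self_nonneg b
  have hz : 0 ≤ c * c := mul_self_nonneg c
  generalize a * a = x at hx ⊢
  generalize b * b = y at hy ⊢
  generalize c * c = z at hz ⊢
  rw [Bool.eq_iff_iff]
  simp only [Bool.or_eq_true, decide_eq_true_iff, beq_iff_eq]
  omega

-- ===== VERDICT (by name: the statement is the Claim_ definition above) =====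
theorem is_right_triangle_spec : Claim_equal_is_right_triangle := by
  intro edges _
  unfold Spec_is_right_triangle
  match edges with
  | [] => rfl
  | [_] => rfl
  | [_, _] => rfl
  | _ :: _ :: _ :: _ :: _ => simp [is_right_triangle, is_right_triangle_alt]
  | [a, b, c] =>
      have h3 : PySem.List.pyRange 0 3 1 = [0, 1, 2] := by decide
      simp only [is_right_triangle, is_right_triangle_alt, h3, List.length_cons,
        List.length_nil, pvALoop_eq_maxTest]
      norm_num
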